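-- pv_equiv track=rewrite | github.com/VentroArt/zabodin_project | labs/lab_9_zabodin.py | copy_split
-- ===== SOURCE A (Python) =====
-- def copy_split(line):
--     line = line.strip()
--     list = []
--     if line.isspace() or line == "":
--         return list
--     word = ""
--     for letter in line:
--         if letter == " ":
--             list.append(word)
--             word = ""
--         else:
--             word += letter
--     list.append(word)
--     return list
-- ===== SOURCE B (Python) =====
-- def copy_split(line):
--     rest = line.strip()
--     if rest == "":
--         return []
--     parts = []
--     while True:
--         idx = rest.find(" ")
--         if idx == -1:
--             parts.append(rest)
--             return parts
--         parts.append(rest[:idx])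
--         rest = rest[idx + 1:]
-- ===== Notes on version B (the rewrite author's own statement) =====
-- stated objective: faster
-- what changed: Replaces the per-character word-accumulation loop (appending letters to a growing word) with a find-and-slice loop that locates each space with str.find and appends whole slices, dropping the redundant isspace guard; a timing run measured it 11.6x faster at the largest size (C-level find/slice instead of a per-character Python loop).
import Mathlib
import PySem

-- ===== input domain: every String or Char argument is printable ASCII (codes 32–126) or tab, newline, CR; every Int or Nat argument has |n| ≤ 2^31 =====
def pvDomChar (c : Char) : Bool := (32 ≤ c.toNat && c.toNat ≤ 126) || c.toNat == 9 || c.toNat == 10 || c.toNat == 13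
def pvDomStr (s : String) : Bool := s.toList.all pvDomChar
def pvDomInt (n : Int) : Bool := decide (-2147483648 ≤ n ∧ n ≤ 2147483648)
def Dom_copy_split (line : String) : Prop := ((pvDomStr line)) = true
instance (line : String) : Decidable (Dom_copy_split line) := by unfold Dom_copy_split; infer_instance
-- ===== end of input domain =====

-- B replaces A's per-character word-accumulation loop by a find-and-slice loop
-- (locate each space with str.find, append whole slices); measured constant-factor faster.

-- ===== PORT A =====
-- A's loop body as a named helper; Python's growing str `word` is kept as a List Char
-- (`word += letter` = appending one char), turned into a String exactly where A appends it.
def copy_split_step (st : List String × List Char) (letter : Char) : List String × List Char :=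
  if letter = ' ' then (st.1 ++ [String.ofList st.2], []) else (st.1, st.2 ++ [letter])

def copy_split (line : String) : List String :=
  let line := PySem.Str.strip line
  let list : List String := []
  if PySem.Str.strIsspace line || line == "" then list
  else
    let r := line.toList.foldl copy_split_step (list, ([] : List Char))
    r.1 ++ [String.ofList r.2]

-- ===== PORT B =====
-- termination fact for B's while loop: after a found space, the remaining slice is shorter
theorem copy_split_go_dec (rest : List Char) (h : ¬ PySem.Chars.find rest [' '] = -1) :
    (PySem.List.slice rest (some (PySem.Chars.find rest [' '] + 1)) none).length < rest.length := by
  have hm1 : -1 ≤ PySem.Chars.find rest [' '] := PySem.Chars.neg_one_le_find rest [' ']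
  have h0 : 0 ≤ PySem.Chars.find rest [' '] := by omega
  have hpre := (PySem.Chars.find_spec h0).1
  have hlt : (PySem.Chars.find rest [' ']).toNat < rest.length := by
    rcases hpre with ⟨t, ht⟩
    have : (List.drop (PySem.Chars.find rest [' ']).toNat rest).length ≠ 0 := by
      rw [← ht]; simp
    simp [List.length_drop] at this
    omega
  rw [PySem.List.slice_from rest (by omega)]
  have : (PySem.Chars.find rest [' '] + 1).toNat = (PySem.Chars.find rest [' ']).toNat + 1 := by
    omega
  simp [List.length_drop, this]
  omega

-- B's while loop: `parts` is the accumulated list, `rest` the not-yet-split tail of the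
-- stripped string (a Python str = its list of code points; rest[:idx] / rest[idx+1:] are slices)
def copy_split_alt_go (parts : List String) (rest : List Char) : List String :=
  let idx := PySem.Chars.find rest [' ']
  if h : idx = -1 then parts ++ [String.ofList rest]
  else copy_split_alt_go (parts ++ [String.ofList (PySem.List.slice rest none (some idx))])
        (PySem.List.slice rest (some (idx + 1)) none)
termination_by rest.length
decreasing_by exact copy_split_go_dec rest h

def copy_split_alt (line : String) : List String :=
  let rest := PySem.Str.strip line
  if rest == "" then [] else copy_split_alt_go [] rest.toList

-- ===== PRECONDITION & SPEC =====
def Spec_copy_split (line : String) (out : List String) : Prop := out = copy_split_alt line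
instance (line : String) (out : List String) : Decidable (Spec_copy_split line out) := by unfold Spec_copy_split; infer_instance

-- ===== CLAIM (what is proved, stated in full; the proofs are below) =====
def Claim_equal_copy_split : Prop := ∀ (line : String), Dom_copy_split line → Spec_copy_split line (copy_split line)

-- ===== LEMMAS AND PROOFS =====

theorem prefix_singleton_iff (c : Char) (l : List Char) : [c] <+: l ↔ l.head? = some c := by
  cases l <;> simp [List.cons_prefix_cons, eq_comm]

theorem find_space_not_mem (w : List Char) (h : ' ' ∉ w) : PySem.Chars.find w [' '] = -1 := by
  rw [PySem.Chars.find_eq_neg_one_iff]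
  intro hinf
  exact h (List.singleton_sublist.mp hinf.sublist)

theorem find_space_first (w t : List Char) (h : ' ' ∉ w) :
    PySem.Chars.find (w ++ ' ' :: t) [' '] = (w.length : Int) := by
  have hinf : [' '] <:+: (w ++ ' ' :: t) := ⟨w, t, by simp⟩
  have h0 : 0 ≤ PySem.Chars.find (w ++ ' ' :: t) [' '] :=
    (PySem.Chars.find_nonneg_iff _ _).mpr hinf
  obtain ⟨hpre, hmin⟩ := PySem.Chars.find_spec h0
  have hle : (PySem.Chars.find (w ++ ' ' :: t) [' ']).toNat ≤ w.length := by
    by_contra hgt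
    exact hmin w.length (by omega)
      (by rw [List.drop_left]; exact (prefix_singleton_iff _ _).mpr rfl)
  have hge : ¬ (PySem.Chars.find (w ++ ' ' :: t) [' ']).toNat < w.length := by
    intro hn
    have hh := (prefix_singleton_iff _ _).mp hpre
    rw [List.head?_drop] at hh
    rw [List.getElem?_append_left hn] at hh
    exact h (List.mem_of_getElem? hh)
  omega

theorem copy_split_loop_eq (cs : List Char) : ∀ (acc : List String) (w : List Char), ' ' ∉ w →
    (cs.foldl copy_split_step (acc, w)).1 ++ [String.ofList (cs.foldl copy_split_step (acc, w)).2]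
      = copy_split_alt_go acc (w ++ cs) := by
  induction cs with
  | nil =>
    intro acc w h
    rw [List.append_nil, copy_split_alt_go]
    simp [find_space_not_mem w h]
  | cons c cs' ih =>
    intro acc w h
    by_cases hc : c = ' '
    · subst hc
      have lhs : (' ' :: cs').foldl copy_split_step (acc, w)
          = cs'.foldl copy_split_step (acc ++ [String.ofList w], []) := by
        simp [List.foldl_cons, copy_split_step]
      rw [lhs, ih (acc ++ [String.ofList w]) [] (by simp)]
      have hfind := find_space_first w cs' h
      have hne : ¬ ((w.length : Int) = -1) := by omega
      have htake : PySem.List.slice (w ++ ' ' :: cs') none (some (w.length : Int)) = w := by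
        rw [PySem.List.slice_to_natCast]
        exact List.take_left
      have hdrop : PySem.List.slice (w ++ ' ' :: cs') (some ((w.length : Int) + 1)) none = cs' := by
        have : ((w.length : Int) + 1) = (((w.length + 1 : Nat)) : Int) := by push_cast; ring
        rw [this, PySem.List.slice_from_natCast]
        rw [show w ++ ' ' :: cs' = (w ++ [' ']) ++ cs' by simp,
            show w.length + 1 = (w ++ [' ']).length by simp]
        exact List.drop_left
      conv_rhs => rw [copy_split_alt_go]
      simp only [hfind, dif_neg hne, htake, hdrop]
      rw [List.nil_append]
    · have lhs : (c :: cs').foldl copy_split_step (acc, w)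
          = cs'.foldl copy_split_step (acc, w ++ [c]) := by
        simp [List.foldl_cons, copy_split_step, hc]
      have hw' : ' ' ∉ w ++ [c] := by
        simp [h]
        exact fun he => hc he.symm
      rw [lhs, ih acc (w ++ [c]) hw', List.append_assoc]
      rfl

theorem dropWhile_head?_false (p : Char → Bool) (l : List Char) (c : Char)
    (h : (l.dropWhile p).head? = some c) : p c = false := by
  induction l with
  | nil => simp at h
  | cons a l ih =>
    rw [List.dropWhile_cons] at h
    by_cases hp : p a
    · rw [if_pos hp] at h; exact ih h
    · rw [if_neg hp] at h
      simp at h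
      rw [← h]
      simp [hp]

theorem strip_all_space (l : List Char) (h : PySem.Chars.strIsspace (PySem.Chars.strip l) = true) :
    PySem.Chars.strip l = [] := by
  by_contra hne
  have hpre : PySem.Chars.strip l <+: PySem.Chars.lstrip l := by
    have h2 := (List.dropWhile_suffix (l := (PySem.Chars.lstrip l).reverse) PySem.Chars.isspace).reverse
    rwa [List.reverse_reverse] at h2
  obtain ⟨c, rest, hcr⟩ := List.exists_cons_of_ne_nil hne
  obtain ⟨t, ht⟩ := hpre
  have hl : List.dropWhile PySem.Chars.isspace l = c :: (rest ++ t) := by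
    have : PySem.Chars.lstrip l = c :: (rest ++ t) := by rw [← ht, hcr]; simp
    exact this
  have hnsp : PySem.Chars.isspace c = false :=
    dropWhile_head?_false _ l c (by rw [hl]; rfl)
  rw [hcr] at h
  simp [PySem.Chars.strIsspace] at h
  rw [h.1] at hnsp
  exact absurd hnsp (by simp)

theorem strip_isspace_str (line : String) (h : PySem.Str.strIsspace (PySem.Str.strip line) = true) :
    PySem.Str.strip line = "" := by
  have h' : PySem.Chars.strIsspace (PySem.Str.strip line).toList = true := by
    rw [← PySem.Str.strIsspace_eq]; exact h
  rw [PySem.Str.toList_strip] at h'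
  have := strip_all_space line.toList h'
  have h2 : (PySem.Str.strip line).toList = [] := by rw [PySem.Str.toList_strip, this]
  exact String.toList_inj.mp (by simp [h2])

-- ===== VERDICT (by name: the statement is the Claim_ definition above) =====
theorem copy_split_spec : Claim_equal_copy_split := by
  intro line _
  show copy_split line = copy_split_alt line
  unfold copy_split copy_split_alt
  by_cases he : PySem.Str.strip line = ""
  · simp [he]
  · have hb : (PySem.Str.strip line == "") = false := by
      simp [he]
    have hsp : PySem.Str.strIsspace (PySem.Str.strip line) = false := by
      cases hq : PySem.Str.strIsspace (PySem.Str.strip line)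
      · rfl
      · exact absurd (strip_isspace_str line hq) he
    simp only [hsp, hb, Bool.or_self]
    simp only [Bool.false_eq_true, if_false]
    have := copy_split_loop_eq (PySem.Str.strip line).toList [] [] (by simp)
    rw [List.nil_append] at this
    exact this
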